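-- pv_equiv track=rewrite | github.com/larynx95/rosalind | src/ba04/ba04g_lb_cpep_seq/ba04g.py | cyclo_score
-- ===== SOURCE A (Python) =====
-- def cyclo_spectrum(ipeptide):
--     """
--     [int] -> [int]
--     returns a cyclo-spectrum from a list of single amino acid masses
--     >>> cyclo_spectrum([113,128,186])
--         [0,113,128,186,241,299,314,427]
--     """
--     prefix_mass = [0]
--     for mass in ipeptide:
--         prefix_mass.append(prefix_mass[-1] + mass)
--     cspectrum = [0]
--     peptide_mass = prefix_mass[-1]
--     for i in range(len(ipeptide)):
--         for j in range(i+1, len(ipeptide)+1):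
--             cspectrum.append(prefix_mass[j] - prefix_mass[i])
--             if i > 0 and j < len(ipeptide):
--                 cspectrum.append(peptide_mass - (prefix_mass[j] - prefix_mass[i]))
--     return sorted(cspectrum)
--
-- def cyclo_score(ipeptide, cspectrum):
--     """
--     ([int],[int]) -> int
--     >>> cyclo_score([114,128,129,113], [0,99,113,114,128,227,257,299,355,356,370,371,484])
--     """
--     common = []
--     theoretical_cspectrum = cyclo_spectrum(ipeptide)
--     for mass in cspectrum:
--         if mass in theoretical_cspectrum:
--             theoretical_cspectrum.remove(mass)
--             common.append(mass)
--     return len(common)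
-- ===== SOURCE B (Python) =====
-- def cyclo_score(ipeptide, cspectrum):
--     n = len(ipeptide)
--     total = sum(ipeptide)
--     theo = [0]
--     for i in range(n):
--         for j in range(i + 1, n + 1):
--             frag = sum(ipeptide[i:j])
--             theo.append(frag)
--             if i > 0 and j < n:
--                 theo.append(total - frag)
--     score = 0
--     seen = set()
--     for m in cspectrum:
--         if m not in seen:
--             seen.add(m)
--             score += min(cspectrum.count(m), theo.count(m))
--     return score
-- ===== Notes on version B (the rewrite author's own statement) =====
-- stated objective: alternative
-- what changed: B computes fragment masses as direct slice sums instead of a prefix-mass table, skips the sort entirely, and scores by summing min(multiplicity in spectrum, multiplicity in theoretical spectrum) over the distinct observed masses instead of A's destructive remove-loop over the sorted theoretical spectrum.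
import Mathlib
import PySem

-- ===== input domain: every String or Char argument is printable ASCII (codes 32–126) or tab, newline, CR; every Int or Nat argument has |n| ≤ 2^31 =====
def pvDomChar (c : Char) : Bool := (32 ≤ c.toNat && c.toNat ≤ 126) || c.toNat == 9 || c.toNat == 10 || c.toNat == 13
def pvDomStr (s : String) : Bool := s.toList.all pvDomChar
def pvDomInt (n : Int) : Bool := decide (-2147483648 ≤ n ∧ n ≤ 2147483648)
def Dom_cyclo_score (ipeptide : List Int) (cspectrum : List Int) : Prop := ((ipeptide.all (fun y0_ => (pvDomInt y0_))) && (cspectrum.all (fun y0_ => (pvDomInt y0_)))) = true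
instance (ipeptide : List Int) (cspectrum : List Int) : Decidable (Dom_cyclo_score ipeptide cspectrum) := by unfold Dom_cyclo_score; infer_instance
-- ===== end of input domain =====

-- B replaces the prefix-mass table by direct slice sums, drops the sort, and scores by
-- summing min(multiplicities) over distinct observed masses instead of A's remove-loop
-- (objective: alternative; same result, no speed claim).

-- ===== PORT A =====
def cyclo_spectrum (ipeptide : List Int) : List Int :=
  let prefix_mass : List Int :=
    ipeptide.foldl (fun pm mass => pm ++ [PySem.List.pyGetD pm (-1) 0 + mass]) [(0 : Int)]
  let cspectrum : List Int := [(0 : Int)]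
  let peptide_mass : Int := PySem.List.pyGetD prefix_mass (-1) 0
  let cspectrum :=
    (PySem.List.pyRange 0 (ipeptide.length : Int) 1).foldl (fun acc i =>
      (PySem.List.pyRange (i + 1) ((ipeptide.length : Int) + 1) 1).foldl (fun acc j =>
        let acc := acc ++ [PySem.List.pyGetD prefix_mass j 0 - PySem.List.pyGetD prefix_mass i 0]
        if 0 < i ∧ j < (ipeptide.length : Int) then
          acc ++ [peptide_mass - (PySem.List.pyGetD prefix_mass j 0 - PySem.List.pyGetD prefix_mass i 0)]
        else acc) acc) cspectrum
  PySem.List.sorted cspectrum (fun x => x) false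

def cyclo_score (ipeptide : List Int) (cspectrum : List Int) : Int :=
  let common : List Int := []
  let theoretical_cspectrum : List Int := cyclo_spectrum ipeptide
  let st :=
    cspectrum.foldl (fun (st : List Int × List Int) mass =>
      if mass ∈ st.2 then (st.1 ++ [mass], (PySem.List.remove? st.2 mass).getD st.2)
      else st) (common, theoretical_cspectrum)
  (st.1.length : Int)

-- ===== PORT B =====
def cyclo_score_alt (ipeptide : List Int) (cspectrum : List Int) : Int :=
  let n : Int := (ipeptide.length : Int)
  let total : Int := ipeptide.sum
  let theo : List Int :=
    (PySem.List.pyRange 0 n 1).foldl (fun acc i =>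
      (PySem.List.pyRange (i + 1) (n + 1) 1).foldl (fun acc j =>
        let frag := (PySem.List.slice ipeptide (some i) (some j)).sum
        let acc := acc ++ [frag]
        if 0 < i ∧ j < n then acc ++ [total - frag] else acc) acc) [(0 : Int)]
  let st :=
    cspectrum.foldl (fun (st : Int × PySem.Set Int) m =>
      if m ∈ st.2 then st
      else (st.1 + min ((cspectrum.count m : Int)) ((theo.count m : Int)), PySem.Set.add st.2 m))
      ((0 : Int), PySem.Set.empty)
  st.1

-- ===== PRECONDITION & SPEC =====
def Spec_cyclo_score (ipeptide : List Int) (cspectrum : List Int) (out : Int) : Prop := out = cyclo_score_alt ipeptide cspectrum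
instance (ipeptide : List Int) (cspectrum : List Int) (out : Int) : Decidable (Spec_cyclo_score ipeptide cspectrum out) := by unfold Spec_cyclo_score; infer_instance

-- ===== CLAIM (what is proved, stated in full; the proofs are below) =====
def Claim_equal_cyclo_score : Prop := ∀ (ipeptide : List Int) (cspectrum : List Int), Dom_cyclo_score ipeptide cspectrum → Spec_cyclo_score ipeptide cspectrum (cyclo_score ipeptide cspectrum)

-- ===== LEMMAS AND PROOFS =====

def rawA (ipeptide : List Int) : List Int :=
  let prefix_mass : List Int :=
    ipeptide.foldl (fun pm mass => pm ++ [PySem.List.pyGetD pm (-1) 0 + mass]) [(0 : Int)]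
  let peptide_mass : Int := PySem.List.pyGetD prefix_mass (-1) 0
  (PySem.List.pyRange 0 (ipeptide.length : Int) 1).foldl (fun acc i =>
    (PySem.List.pyRange (i + 1) ((ipeptide.length : Int) + 1) 1).foldl (fun acc j =>
      let acc := acc ++ [PySem.List.pyGetD prefix_mass j 0 - PySem.List.pyGetD prefix_mass i 0]
      if 0 < i ∧ j < (ipeptide.length : Int) then
        acc ++ [peptide_mass - (PySem.List.pyGetD prefix_mass j 0 - PySem.List.pyGetD prefix_mass i 0)]
      else acc) acc) [(0 : Int)]

def rawB (ipeptide : List Int) : List Int :=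
  (PySem.List.pyRange 0 (ipeptide.length : Int) 1).foldl (fun acc i =>
    (PySem.List.pyRange (i + 1) ((ipeptide.length : Int) + 1) 1).foldl (fun acc j =>
      let frag := (PySem.List.slice ipeptide (some i) (some j)).sum
      let acc := acc ++ [frag]
      if 0 < i ∧ j < (ipeptide.length : Int) then acc ++ [ipeptide.sum - frag] else acc) acc)
    [(0 : Int)]

theorem last_app (xs : List Int) (x : Int) :
    PySem.List.pyGetD (xs ++ [x]) (-1) 0 = x := by
  simp [PySem.List.pyGetD, PySem.List.pyGet?, PySem.List.pyIdx?]

theorem aux : ∀ (l pm : List Int) (s : Int), PySem.List.pyGetD pm (-1) 0 = s →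
    l.foldl (fun pm mass => pm ++ [PySem.List.pyGetD pm (-1) 0 + mass]) pm
      = pm ++ (List.range l.length).map (fun k => s + (l.take (k+1)).sum) := by
  intro l
  induction l with
  | nil => intro pm s h; simp
  | cons a t ih =>
    intro pm s h
    have h2 : PySem.List.pyGetD (pm ++ [s + a]) (-1) 0 = s + a := last_app _ _
    simp only [List.foldl_cons, h]
    rw [ih (pm ++ [s + a]) (s + a) h2]
    simp [List.range_succ_eq_map, List.map_map, Function.comp_def, List.append_assoc]
    intro k hk; ring

theorem prefix_mass_eq (ipeptide : List Int) :
    ipeptide.foldl (fun pm mass => pm ++ [PySem.List.pyGetD pm (-1) 0 + mass]) [(0 : Int)]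
      = (List.range (ipeptide.length + 1)).map (fun k => (ipeptide.take k).sum) := by
  rw [aux ipeptide [(0:Int)] 0 (by decide)]
  simp [List.range_succ_eq_map, List.map_map, Function.comp_def]

theorem pref_get (p : List Int) (j : Int) (h0 : 0 ≤ j) (h1 : j ≤ (p.length : Int)) :
    PySem.List.pyGetD ((List.range (p.length + 1)).map (fun k => (p.take k).sum)) j 0
      = (p.take j.toNat).sum := by
  rw [PySem.List.pyGetD_of_nonneg _ _ h0, PySem.List.getD_map_range _ _ _ _ (by omega)]

theorem pref_last (p : List Int) :
    PySem.List.pyGetD ((List.range (p.length + 1)).map (fun k => (p.take k).sum)) (-1) 0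
      = p.sum := by
  rw [List.range_succ, List.map_append]
  simp

theorem slice_sum (p : List Int) (i j : Int) (h0 : 0 ≤ i) (hij : i ≤ j) (hj : j ≤ (p.length : Int)) :
    (PySem.List.slice p (some i) (some j)).sum
      = (p.take j.toNat).sum - (p.take i.toNat).sum := by
  rw [PySem.List.slice_of_nonneg p h0 (le_trans h0 hij) (le_trans hij hj) hj]
  have h2 : List.take i.toNat p ++ List.take (j.toNat - i.toNat) (List.drop i.toNat p)
      = List.take j.toNat p := by
    rw [← List.take_add]; congr 1; omega
  rw [← h2, List.sum_append]
  ring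

theorem rawA_eq_rawB (ipeptide : List Int) : rawA ipeptide = rawB ipeptide := by
  unfold rawA rawB
  simp only [prefix_mass_eq, pref_last]
  apply PySem.List.foldl_congr_mem
  intro acc i hi
  obtain ⟨hi0, hin⟩ := PySem.List.mem_pyRange_one.mp hi
  apply PySem.List.foldl_congr_mem
  intro acc2 j hj
  obtain ⟨hj1, hj2⟩ := PySem.List.mem_pyRange_one.mp hj
  rw [pref_get _ j (by omega) (by omega), pref_get _ i (by omega) (by omega),
      slice_sum _ i j (by omega) (by omega) (by omega)]

theorem loopA_card (cs : List Int) : ∀ (theo common : List Int),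
    ((cs.foldl (fun (st : List Int × List Int) mass =>
      if mass ∈ st.2 then (st.1 ++ [mass], (PySem.List.remove? st.2 mass).getD st.2)
      else st) (common, theo)).1.length : Int)
    = (common.length : Int) + (Multiset.card ((cs : Multiset Int) ∩ (theo : Multiset Int)) : Int) := by
  induction cs with
  | nil => intro theo common; simp
  | cons m cs ih =>
    intro theo common
    simp only [List.foldl_cons]
    by_cases h : m ∈ theo
    · rw [if_pos h]
      simp only [PySem.List.remove?_eq_some_erase theo m h, Option.getD_some]
      rw [ih]
      have : ((m :: cs : List Int) : Multiset Int) ∩ (theo : Multiset Int)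
          = m ::ₘ ((cs : Multiset Int) ∩ ((theo : Multiset Int).erase m)) := by
        rw [← Multiset.cons_coe]
        exact Multiset.cons_inter_of_pos _ (Multiset.mem_coe.mpr h)
      rw [this, Multiset.coe_erase]
      simp
      ring
    · rw [if_neg h, ih]
      have : ((m :: cs : List Int) : Multiset Int) ∩ (theo : Multiset Int)
          = (cs : Multiset Int) ∩ (theo : Multiset Int) := by
        rw [← Multiset.cons_coe]
        exact Multiset.cons_inter_of_neg _ (fun hc => h (Multiset.mem_coe.mp hc))
      rw [this]

theorem loopB_sum (cs theo : List Int) : ∀ (l : List Int) (seen : List Int) (score : Int),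
    seen.Nodup →
    (l.foldl (fun (st : Int × PySem.Set Int) m =>
      if m ∈ st.2 then st
      else (st.1 + min ((cs.count m : Int)) ((theo.count m : Int)), PySem.Set.add st.2 m))
      (score, seen)).1
    = score + ((∑ a ∈ l.toFinset \ seen.toFinset, min (cs.count a) (theo.count a) : ℕ) : Int) := by
  intro l
  induction l with
  | nil => intro seen score _; simp
  | cons m l ih =>
    intro seen score hnd
    simp only [List.foldl_cons]
    by_cases h : m ∈ seen
    · rw [if_pos h, ih seen score hnd]
      have : (m :: l).toFinset \ seen.toFinset = l.toFinset \ seen.toFinset := by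
        ext a
        simp only [List.toFinset_cons, Finset.mem_sdiff, Finset.mem_insert, List.mem_toFinset]
        constructor
        · rintro ⟨(rfl | ha), hs⟩
          · exact absurd h hs
          · exact ⟨ha, hs⟩
        · rintro ⟨ha, hs⟩; exact ⟨Or.inr ha, hs⟩
      rw [this]
    · rw [if_neg h]
      have hadd : PySem.Set.add seen m = seen ++ [m] := by
        simp [PySem.Set.add, h]
      rw [hadd]
      rw [ih (seen ++ [m]) _ (by simp [List.nodup_append, hnd]; exact fun a ha ham => h (ham ▸ ha))]
      have hS2 : l.toFinset \ (seen ++ [m]).toFinset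
          = ((m :: l).toFinset \ seen.toFinset).erase m := by
        ext a; simp; tauto
      have hmem : m ∈ (m :: l).toFinset \ seen.toFinset := by simp [h]
      have := Finset.sum_erase_add ((m :: l).toFinset \ seen.toFinset)
        (fun a => min (cs.count a) (theo.count a)) hmem
      rw [hS2, ← this]
      push_cast
      ring
theorem card_inter_eq_sum (cs theo : List Int) :
    Multiset.card ((cs : Multiset Int) ∩ (theo : Multiset Int))
      = ∑ a ∈ cs.toFinset, min (cs.count a) (theo.count a) := by
  rw [← Multiset.toFinset_sum_count_eq ((cs : Multiset Int) ∩ (theo : Multiset Int))]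
  rw [Finset.sum_subset (s₁ := ((cs : Multiset Int) ∩ (theo : Multiset Int)).toFinset)
        (s₂ := cs.toFinset)
        (by intro a ha
            simp only [Multiset.mem_toFinset, Multiset.mem_inter] at ha
            simpa [List.mem_toFinset] using ha.1)
        (by intro a _ ha
            simp only [Multiset.mem_toFinset] at ha
            exact Multiset.count_eq_zero.mpr ha)]
  apply Finset.sum_congr rfl
  intro a _
  rw [Multiset.count_inter]
  simp

theorem cyclo_spectrum_eq_sorted_rawA (p : List Int) :
    cyclo_spectrum p = PySem.List.sorted (rawA p) (fun x => x) false := rfl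

theorem count_theo_eq (p : List Int) (a : Int) :
    (cyclo_spectrum p).count a = (rawB p).count a := by
  rw [cyclo_spectrum_eq_sorted_rawA, (PySem.List.sorted_perm (rawA p) (fun x => x) false).count_eq,
      rawA_eq_rawB]

-- ===== VERDICT (by name: the statement is the Claim_ definition above) =====
theorem cyclo_score_spec : Claim_equal_cyclo_score := by
  intro p cs _
  unfold Spec_cyclo_score
  have hA : cyclo_score p cs
      = (Multiset.card ((cs : Multiset Int) ∩ ((cyclo_spectrum p : List Int) : Multiset Int)) : Int) := by
    unfold cyclo_score
    rw [loopA_card]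
    simp
  have hB : cyclo_score_alt p cs
      = ((∑ a ∈ cs.toFinset, min (cs.count a) ((rawB p).count a) : ℕ) : Int) := by
    unfold cyclo_score_alt
    show (cs.foldl (fun (st : Int × PySem.Set Int) m =>
      if m ∈ st.2 then st
      else (st.1 + min ((cs.count m : Int)) (((rawB p).count m : Int)), PySem.Set.add st.2 m))
      ((0 : Int), PySem.Set.empty)).1 = _
    rw [loopB_sum cs (rawB p) cs PySem.Set.empty 0 List.nodup_nil]
    simp
  rw [hA, hB, card_inter_eq_sum]
  congr 1
  apply Finset.sum_congr rfl
  intro a _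
  rw [count_theo_eq]
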